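-- pv_equiv track=rewrite | github.com/bdngo/math-algs | primality_tests.py | ll_primality
-- ===== SOURCE A (Python) =====
-- def trial_div(n):
--     """Determines if natural number N is prime by trial division."""
--     if n == 1:
--         return False
--     i = 2
--     while i**2 <= n:
--         if n % i == 0:
--             return False
--         i += 1
--     return True
--
-- def lucas_lehmer():
--     """Generates the Lucas-Lehmer sequence."""
--     seed = 4
--     while True:
--         yield seed
--         seed = seed**2 - 2
--
-- def ll_primality(n):
--     """Determines if Mersenne number 2^N - 1 is prime via the Lucas-Lehmer primality test."""
--     if n <= 2 or not trial_div(n):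
--         return False
--     luc_leh = lucas_lehmer()
--     for _ in range(n - 1):
--         ll = next(luc_leh)
--     if ll % (2**n - 1) == 0:
--         return True
--     return False
-- ===== SOURCE B (Python) =====
-- def ll_primality(n):
--     """Determines if Mersenne number 2^N - 1 is prime via the Lucas-Lehmer primality test."""
--     if n <= 2:
--         return False
--     if n % 2 == 0:
--         return False
--     d = 3
--     while d * d <= n:
--         if n % d == 0:
--             return False
--         d += 2
--     m = 2 ** n - 1
--     s = 4 % m
--     for _ in range(n - 2):
--         s = (s * s - 2) % m
--     return s == 0
-- ===== Notes on version B (the rewrite author's own statement) =====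
-- stated objective: alternative
-- what changed: B reduces the Lucas-Lehmer iterate modulo the Mersenne number at every step (n-bit modular squarings instead of A's unreduced integers of doubly-exponential bit growth) and trial-divides n by even/odd split, testing odd candidates only.
import Mathlib
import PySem

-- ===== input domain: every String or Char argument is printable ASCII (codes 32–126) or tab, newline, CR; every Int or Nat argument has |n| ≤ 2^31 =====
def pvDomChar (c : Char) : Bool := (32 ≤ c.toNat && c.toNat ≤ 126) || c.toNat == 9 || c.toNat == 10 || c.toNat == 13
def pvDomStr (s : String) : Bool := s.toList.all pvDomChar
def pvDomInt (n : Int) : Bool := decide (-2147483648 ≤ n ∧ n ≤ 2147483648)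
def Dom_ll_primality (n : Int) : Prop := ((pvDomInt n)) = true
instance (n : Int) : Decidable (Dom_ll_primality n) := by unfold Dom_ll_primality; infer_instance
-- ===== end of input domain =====

-- B replaces A's unreduced Lucas-Lehmer sequence by the same iteration reduced modulo
-- 2^n - 1 at every step, and trial-divides n by 2 then odd candidates only.

-- ===== PORT A =====
-- while loop of trial_div: i starts at 2, increments by 1 while i**2 <= n.
-- The Nat fuel only makes the loop total: it starts at (n+1).toNat ≥ the number of
-- iterations, so the fuel-0 branch is reached only when the guard i*i ≤ n is false
-- (then the loop would also stop with True).
def llTrialA (n : Int) : Nat → Int → Bool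
  | 0, _ => true
  | fuel + 1, i =>
    if i * i ≤ n then
      if PySem.Int.mod n i == 0 then false else llTrialA n fuel (i + 1)
    else true

def llTrialDiv (n : Int) : Bool :=
  if n == 1 then false else llTrialA n (n + 1).toNat 2

def ll_primality (n : Int) : Bool :=
  if n ≤ 2 then false
  else if ¬ llTrialDiv n then false
  else
    -- `for _ in range(n-1): ll = next(luc_leh)`: state = (generator's seed, ll);
    -- the loop runs at least once here (n ≥ 3), so the initial ll value (0) is never the result,
    -- exactly as Python's `ll` is unbound before the loop but always assigned.
    let p := (List.range (n - 1).toNat).foldl (fun st _ => (st.1 ^ 2 - 2, st.1)) ((4 : Int), (0 : Int))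
    -- 2**n : exact as 2 ^ n.toNat since n ≥ 3 on this branch
    if PySem.Int.mod p.2 (2 ^ n.toNat - 1) == 0 then true else false

-- ===== PORT B =====
-- while loop of B: d starts at 3, increments by 2 while d*d <= n (same fuel guard as above)
def llTrialB (n : Int) : Nat → Int → Bool
  | 0, _ => true
  | fuel + 1, d =>
    if d * d ≤ n then
      if PySem.Int.mod n d == 0 then false else llTrialB n fuel (d + 2)
    else true

def ll_primality_alt (n : Int) : Bool :=
  if n ≤ 2 then false
  else if PySem.Int.mod n 2 == 0 then false
  else if ¬ llTrialB n (n + 1).toNat 3 then false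
  else
    let m : Int := 2 ^ n.toNat - 1
    let s := (List.range (n - 2).toNat).foldl (fun s _ => PySem.Int.mod (s * s - 2) m) (PySem.Int.mod 4 m)
    s == 0

-- ===== PRECONDITION & SPEC =====
def Spec_ll_primality (n : Int) (out : Bool) : Prop := out = ll_primality_alt n
instance (n : Int) (out : Bool) : Decidable (Spec_ll_primality n out) := by unfold Spec_ll_primality; infer_instance

-- ===== CLAIM (what is proved, stated in full; the proofs are below) =====
def Claim_equal_ll_primality : Prop := ∀ (n : Int), Dom_ll_primality n → Spec_ll_primality n (ll_primality n)

-- ===== LEMMAS AND PROOFS =====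

lemma llSqLe (n i : Int) (h : i * i ≤ n) : i ≤ n := by
  rcases le_or_gt i 0 with h0 | h1
  · exact h0.trans (le_trans (mul_self_nonneg i) h)
  · nlinarith

lemma llTrialA_stop (n i : Int) (h : ¬ i * i ≤ n) : ∀ f, llTrialA n f i = true := by
  intro f; cases f <;> simp [llTrialA, h]

lemma llTrialB_stop (n i : Int) (h : ¬ i * i ≤ n) : ∀ f, llTrialB n f i = true := by
  intro f; cases f <;> simp [llTrialB, h]

-- A's and B's trial-division loops agree on odd n for odd i ≥ 3, with enough fuel on both sides.
lemma llTrial_eq (n : Int) (hn : n % 2 = 1) :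
    ∀ k i f g, (n + 1 - i).toNat ≤ k → (n + 1 - i).toNat ≤ f → (n + 1 - i).toNat ≤ g →
      i % 2 = 1 → 3 ≤ i → llTrialA n f i = llTrialB n g i := by
  intro k
  induction k with
  | zero =>
    intro i f g hk _ _ _ hi3
    have hns : ¬ i * i ≤ n := by
      intro hle
      have := llSqLe n i hle
      omega
    rw [llTrialA_stop n i hns, llTrialB_stop n i hns]
  | succ k ih =>
    intro i f g hk hf hg hiodd hi3
    by_cases hle : i * i ≤ n
    · have hin : i ≤ n := llSqLe n i hle
      obtain ⟨f', rfl⟩ : ∃ f', f = f' + 1 := ⟨f - 1, by omega⟩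
      obtain ⟨g', rfl⟩ : ∃ g', g = g' + 1 := ⟨g - 1, by omega⟩
      rw [llTrialA, llTrialB, if_pos hle, if_pos hle]
      by_cases hdvd : (PySem.Int.mod n i == 0) = true
      · rw [if_pos hdvd, if_pos hdvd]
      · rw [if_neg hdvd, if_neg hdvd]
        by_cases hle1 : (i + 1) * (i + 1) ≤ n
        · -- A's next candidate i+1 is even and cannot divide the odd n
          have hin1 : i + 1 ≤ n := llSqLe n (i + 1) hle1
          have hev : ¬ (PySem.Int.mod n (i + 1) == 0) = true := by
            simp only [beq_iff_eq, PySem.Int.mod_eq_zero_iff_dvd]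
            intro hdv
            have h2 : (2 : Int) ∣ i + 1 := by omega
            have h2n : (2 : Int) ∣ n := h2.trans hdv
            omega
          obtain ⟨f'', rfl⟩ : ∃ f'', f' = f'' + 1 := ⟨f' - 1, by omega⟩
          rw [llTrialA, if_pos hle1, if_neg hev, show i + 1 + 1 = i + 2 from by ring]
          exact ih (i + 2) f'' g' (by omega) (by omega) (by omega) (by omega) (by omega)
        · have hle2 : ¬ (i + 2) * (i + 2) ≤ n := by nlinarith
          rw [llTrialA_stop n (i + 1) hle1, llTrialB_stop n (i + 2) hle2]
    · rw [llTrialA_stop n i hle, llTrialB_stop n i hle]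

-- A's pair-state fold computes the pure iterates of x ↦ x^2 - 2.
lemma llFoldA (k : Nat) :
    (List.range (k + 1)).foldl (fun (st : Int × Int) _ => (st.1 ^ 2 - 2, st.1)) ((4 : Int), (0 : Int)) =
      ((fun x : Int => x ^ 2 - 2)^[k + 1] 4, (fun x : Int => x ^ 2 - 2)^[k] 4) := by
  induction k with
  | zero => simp [List.range_succ]
  | succ k ih =>
    rw [List.range_succ, List.foldl_append, ih]
    simp [Function.iterate_succ_apply']

-- B's reduced fold equals the pure iterate taken modulo m (m > 0).
lemma llFoldB (m : Int) (hm : 0 < m) (k : Nat) :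
    (List.range k).foldl (fun s _ => PySem.Int.mod (s * s - 2) m) (PySem.Int.mod 4 m) =
      PySem.Int.mod ((fun x : Int => x ^ 2 - 2)^[k] 4) m := by
  induction k with
  | zero => simp
  | succ k ih =>
    rw [List.range_succ, List.foldl_append, ih]
    simp only [List.foldl_cons, List.foldl_nil, Function.iterate_succ_apply']
    rw [PySem.Int.mod_eq_emod_of_pos hm, PySem.Int.mod_eq_emod_of_pos hm,
        PySem.Int.mod_eq_emod_of_pos hm]
    set x := (fun x : Int => x ^ 2 - 2)^[k] 4 with hx
    have : (x % m * (x % m) - 2) % m = (x * x - 2) % m := by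
      conv_rhs => rw [Int.sub_emod, Int.mul_emod]
      rw [Int.sub_emod]
    rw [this]
    ring_nf

-- ===== VERDICT (by name: the statement is the Claim_ definition above) =====
theorem ll_primality_spec : Claim_equal_ll_primality := by
  intro n _
  unfold Spec_ll_primality ll_primality ll_primality_alt
  by_cases h2 : n ≤ 2
  · simp [h2]
  · simp only [h2, if_false]
    have hn3 : 3 ≤ n := by omega
    have hmod2 : PySem.Int.mod n 2 = n % 2 := PySem.Int.mod_eq_emod_of_pos (by norm_num)
    have hpar : n % 2 = 0 ∨ n % 2 = 1 := by omega
    obtain ⟨m, hm1⟩ : ∃ m, (n + 1).toNat = m + 1 := ⟨n.toNat, by omega⟩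
    rcases hpar with hpar | hpar
    · -- even n ≥ 3: both sides reject (A finds the divisor 2)
      have h4 : 4 ≤ n := by omega
      have : llTrialDiv n = false := by
        rw [llTrialDiv, if_neg (by simp; omega), hm1, llTrialA,
            if_pos (show (2 : Int) * 2 ≤ n by omega)]
        simp [hpar]
      simp [this, hpar]
    · -- odd n ≥ 3
      have htrial : llTrialDiv n = llTrialB n (n + 1).toNat 3 := by
        rw [llTrialDiv, if_neg (by simp; omega)]
        by_cases h4 : (2 : Int) * 2 ≤ n
        · rw [hm1, llTrialA, if_pos h4]
          have hne : ¬ (PySem.Int.mod n 2 == 0) = true := by simp [hpar]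
          rw [if_neg hne, show (2 : Int) + 1 = 3 from by norm_num]
          rw [show m + 1 = (n + 1).toNat from by omega]
          exact llTrial_eq n hpar (n - 2).toNat 3 m (n + 1).toNat
            (by omega) (by omega) (by omega) (by omega) (by omega)
        · -- n = 3: both loops stop immediately
          rw [llTrialA_stop n 2 (by omega), llTrialB_stop n 3 (by omega)]
      rw [htrial]
      simp only [hmod2, hpar]
      norm_num
      by_cases htr : llTrialB n (n + 1).toNat 3
      · simp only [htr]
        have hm : (0 : Int) < 2 ^ n.toNat - 1 := by
          have : (2 : Int) ^ 3 ≤ 2 ^ n.toNat := by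
            apply pow_le_pow_right₀ (by norm_num)
            omega
          norm_num at this ⊢
          omega
        have hk : List.range (n.toNat - 1) = List.range ((n - 2).toNat + 1) := by
          congr 1; omega
        rw [hk, llFoldA, llFoldB _ hm]
        by_cases hz : PySem.Int.mod ((fun x : Int => x ^ 2 - 2)^[(n - 2).toNat] 4) (2 ^ n.toNat - 1) = 0
        · simp [hz]
        · simp [hz]
      · simp [htr]
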